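-- pv_equiv track=rewrite | github.com/calvinchankf/GoogleKickStart | 2021/A/b/main.py | prefixSum2D
-- ===== SOURCE A (Python) =====
-- def prefixSum2D(matrix):
--     R, C = len(matrix), len(matrix[0])
--     ones_from_above = [C * [0] for _ in range(R)]
--     ones_from_right = [C * [0] for _ in range(R)]
--     for j in range(C):
--         pfs = 0
--         for i in range(R):
--             if matrix[i][j] == 0:
--                 pfs = 0
--             pfs += matrix[i][j]
--             ones_from_above[i][j] = pfs
--     for i in range(R):
--         pfs = 0
--         for j in range(C-1, -1, -1):
--             if matrix[i][j] == 0: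
--                 pfs = 0
--             pfs += matrix[i][j]
--             ones_from_right[i][j] = pfs
--     return (ones_from_above, ones_from_right)
-- ===== SOURCE B (Python) =====
-- def _row_right(row):
--     if not row:
--         return []
--     rest = _row_right(row[1:])
--     x = row[0]
--     head = 0 if x == 0 else x + (rest[0] if rest else 0)
--     return [head] + rest
--
--
-- def prefixSum2D(matrix):
--     C = len(matrix[0])
--     prev = [0] * C
--     above = []
--     for row in matrix:
--         prev = [0 if x == 0 else x + p for x, p in zip(row, prev)]
--         above.append(prev)
--     right = [_row_right(row[:C]) for row in matrix]
--     return (above, right)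
-- ===== Notes on version B (the rewrite author's own statement) =====
-- stated objective: alternative
-- what changed: Replaces the index-based column/row accumulator loops writing into preallocated grids by a purely structural construction: the from-above table is built row by row with zipWith against the previously computed row, and the from-right table is one independent right-to-left structural recursion per row (each row cut to the table width C = len(matrix[0])); no indices, no running pfs variable, no in-place writes.
import Mathlib
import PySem

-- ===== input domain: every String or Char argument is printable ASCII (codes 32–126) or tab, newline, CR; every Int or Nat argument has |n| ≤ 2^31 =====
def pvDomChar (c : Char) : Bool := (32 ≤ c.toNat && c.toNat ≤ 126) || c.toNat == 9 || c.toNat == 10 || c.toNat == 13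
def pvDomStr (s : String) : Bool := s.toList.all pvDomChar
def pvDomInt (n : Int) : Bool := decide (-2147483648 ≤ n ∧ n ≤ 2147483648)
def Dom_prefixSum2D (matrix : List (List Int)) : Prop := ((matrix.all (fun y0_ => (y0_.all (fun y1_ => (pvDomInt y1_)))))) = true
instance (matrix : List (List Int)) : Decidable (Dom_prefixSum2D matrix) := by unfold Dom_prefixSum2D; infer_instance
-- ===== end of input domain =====

-- B builds both tables structurally (zipWith of consecutive rows; per-row recursion) instead of A's
-- index-loop accumulator writes into preallocated grids; same cost, no speed claim.

-- ===== PORT A =====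
def prefixSum2D (matrix : List (List Int)) : List (List Int) × List (List Int) :=
  let R := matrix.length
  let C := (matrix.headD []).length
  let ofa0 : List (List Int) := List.replicate R (List.replicate C 0)
  let ofr0 : List (List Int) := List.replicate R (List.replicate C 0)
  let ofa := (List.range C).foldl (fun g j =>
    ((List.range R).foldl (fun (s : List (List Int) × Int) i =>
        let x := (matrix.getD i []).getD j 0
        let p := (if x = 0 then 0 else s.2) + x
        (s.1.modify i (fun row => row.set j p), p)) (g, 0)).1) ofa0
  let ofr := (List.range R).foldl (fun g i =>
    (((List.range C).reverse).foldl (fun (s : List (List Int) × Int) j =>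
        let x := (matrix.getD i []).getD j 0
        let p := (if x = 0 then 0 else s.2) + x
        (s.1.modify i (fun row => row.set j p), p)) (g, 0)).1) ofr0
  (ofa, ofr)

-- ===== PORT B =====
def rowRight : List Int → List Int
  | [] => []
  | x :: t =>
    let rest := rowRight t
    (if x = 0 then 0 else x + rest.headD 0) :: rest

def aboveRows : List Int → List (List Int) → List (List Int)
  | _, [] => []
  | prev, row :: rest =>
    let cur := List.zipWith (fun x p => if x = 0 then 0 else x + p) row prev
    cur :: aboveRows cur rest

def prefixSum2D_alt (matrix : List (List Int)) : List (List Int) × List (List Int) :=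
  let C := (matrix.headD []).length
  (aboveRows (List.replicate C 0) matrix,
   matrix.map (fun row => rowRight (row.take C)))  -- row[:C] with C ≥ 0 is exactly List.take C

-- ===== PRECONDITION & SPEC =====
-- Pre_ excludes exactly the inputs on which A raises IndexError: the empty matrix and
-- matrices with a row shorter than the first row.
def Pre_prefixSum2D (matrix : List (List Int)) : Prop :=
  matrix ≠ [] ∧ ∀ r ∈ matrix, (matrix.headD []).length ≤ r.length
instance (matrix : List (List Int)) : Decidable (Pre_prefixSum2D matrix) := by
  unfold Pre_prefixSum2D; infer_instance

def pvWitness_prefixSum2D : List (List Int) := [[1, 0, 2], [3, 4, 0]]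

def Spec_prefixSum2D (matrix : List (List Int)) (out : List (List Int) × List (List Int)) : Prop := out = prefixSum2D_alt matrix
instance (matrix : List (List Int)) (out : List (List Int) × List (List Int)) : Decidable (Spec_prefixSum2D matrix out) := by unfold Spec_prefixSum2D; infer_instance

-- ===== CLAIM (what is proved, stated in full; the proofs are below) =====
def Claim_equal_prefixSum2D : Prop := ∀ (matrix : List (List Int)), Dom_prefixSum2D matrix → Pre_prefixSum2D matrix → Spec_prefixSum2D matrix (prefixSum2D matrix)

-- ===== LEMMAS AND PROOFS =====

-- the cell A reads at row i, column j
def cellM (m : List (List Int)) (i j : Nat) : Int := (m.getD i []).getD j 0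

-- the pfs recurrence of A's first (from-above) loop, by row index
def va (m : List (List Int)) : Nat → Nat → Int
  | 0, j => (if cellM m 0 j = 0 then 0 else 0) + cellM m 0 j
  | i+1, j => (if cellM m (i+1) j = 0 then 0 else va m i j) + cellM m (i+1) j

-- the pfs value carried into step i = n of A's first loop
def pA (m : List (List Int)) (j : Nat) : Nat → Int
  | 0 => 0
  | n+1 => va m n j

-- the step functions of A's two loops, named
def stepAb (m : List (List Int)) (j : Nat) (s : List (List Int) × Int) (i : Nat) : List (List Int) × Int :=
  let x := (m.getD i []).getD j 0
  let p := (if x = 0 then 0 else s.2) + x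
  (s.1.modify i (fun row => row.set j p), p)

def stepRt (m : List (List Int)) (i : Nat) (s : List (List Int) × Int) (j : Nat) : List (List Int) × Int :=
  let x := (m.getD i []).getD j 0
  let p := (if x = 0 then 0 else s.2) + x
  (s.1.modify i (fun row => row.set j p), p)

-- A's second loop restricted to the single row it touches
def rstep (m : List (List Int)) (i : Nat) (s : List Int × Int) (j : Nat) : List Int × Int :=
  let x := (m.getD i []).getD j 0
  let p := (if x = 0 then 0 else s.2) + x
  (s.1.set j p, p)

theorem portA_eq (m : List (List Int)) : prefixSum2D m =
    ((List.range (m.headD []).length).foldl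
        (fun g j => ((List.range m.length).foldl (stepAb m j) (g, 0)).1)
        (List.replicate m.length (List.replicate (m.headD []).length 0)),
     (List.range m.length).foldl
        (fun g i => ((List.range (m.headD []).length).reverse.foldl (stepRt m i) (g, 0)).1)
        (List.replicate m.length (List.replicate (m.headD []).length 0))) := rfl

theorem modify_modify {α : Type} (l : List α) (i : Nat) (f g : α → α) :
    (l.modify i f).modify i g = l.modify i (fun a => g (f a)) := by
  apply List.ext_getElem?
  intro j
  simp only [List.getElem?_modify]
  cases l[j]? <;> simp <;> split <;> simp

theorem map_const_range {α : Type} (n : Nat) (a : α) :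
    (List.range n).map (fun _ => a) = List.replicate n a := by
  apply List.ext_getElem?
  intro i
  by_cases h : i < n
  · simp [List.getElem?_range h, List.getElem?_replicate, h]
  · rw [List.getElem?_eq_none (by simpa using h), List.getElem?_eq_none (by simpa using h)]

theorem map_range_getD_take (r : List Int) (C : Nat) (hC : C ≤ r.length) :
    (List.range C).map (fun j => r.getD j 0) = r.take C := by
  apply List.ext_getElem?
  intro i
  by_cases h : i < C
  · rw [List.getElem?_map, List.getElem?_range h, Option.map_some,
      List.getElem?_take_of_lt h, List.getD_eq_getElem?_getD,
      List.getElem?_eq_getElem (by omega : i < r.length)]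
    rfl
  · rw [List.getElem?_eq_none (by simp only [List.length_map, List.length_range]; omega),
      List.getElem?_eq_none (by simp only [List.length_take]; omega)]

-- ===== from-above table, A side =====
theorem innerAb (m : List (List Int)) (j : Nat) (g : List (List Int)) (n : Nat) :
    ((List.range n).foldl (stepAb m j) (g, 0)).2 = pA m j n ∧
    ∀ i', (((List.range n).foldl (stepAb m j) (g, 0)).1)[i']? =
      if i' < n then (fun row => row.set j (va m i' j)) <$> g[i']? else g[i']? := by
  induction n with
  | zero => simp [pA]
  | succ n ih =>
    rw [List.range_succ, List.foldl_append, List.foldl_cons, List.foldl_nil]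
    obtain ⟨ih2, ih1⟩ := ih
    have hp : (stepAb m j ((List.range n).foldl (stepAb m j) (g, 0)) n).2 = va m n j := by
      simp only [stepAb, ih2]
      cases n <;> simp [pA, va, cellM]
    constructor
    · simpa [pA] using hp
    · intro i'
      have hgrid : (stepAb m j ((List.range n).foldl (stepAb m j) (g, 0)) n).1 =
          (((List.range n).foldl (stepAb m j) (g, 0)).1).modify n
            (fun row => row.set j (va m n j)) := by
        simp only [stepAb, ih2]
        cases n <;> simp [pA, va, cellM]
      rw [hgrid, List.getElem?_modify, ih1]
      rcases Nat.lt_trichotomy i' n with h1 | h1 | h1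
      · have hne : n ≠ i' := by omega
        rw [if_pos h1, if_pos (by omega : i' < n + 1)]
        cases hg : g[i']? with
        | none => rfl
        | some r => simp [hne]
      · subst h1
        rw [if_neg (by omega : ¬ i' < i'), if_pos (by omega : i' < i' + 1)]
        cases hg : g[i']? with
        | none => rfl
        | some r => simp
      · rw [if_neg (by omega : ¬ i' < n), if_neg (by omega : ¬ i' < n + 1)]
        cases hg : g[i']? with
        | none => rfl
        | some r => simp [show n ≠ i' by omega]

theorem aboveA_aux (m : List (List Int)) :
    ∀ k : Nat, k ≤ (m.headD []).length →
    (List.range k).foldl (fun g j => ((List.range m.length).foldl (stepAb m j) (g, 0)).1)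
        (List.replicate m.length (List.replicate (m.headD []).length 0)) =
      (List.range m.length).map (fun i =>
        (List.range (m.headD []).length).map (fun j => if j < k then va m i j else 0)) := by
  intro k
  induction k with
  | zero =>
    intro _
    simp only [List.range_zero, List.foldl_nil]
    apply List.ext_getElem?
    intro i
    by_cases h : i < m.length
    · rw [List.getElem?_replicate, if_pos h, List.getElem?_map, List.getElem?_range h,
        Option.map_some]
      simp [Nat.not_lt_zero, map_const_range]
    · rw [List.getElem?_eq_none (by simp only [List.length_replicate]; omega),
        List.getElem?_eq_none (by simp only [List.length_map, List.length_range]; omega)]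
  | succ k ih =>
    intro hk
    have hk' : k ≤ (m.headD []).length := by omega
    have hkC : k < (m.headD []).length := by omega
    rw [List.range_succ, List.foldl_append, List.foldl_cons, List.foldl_nil, ih hk']
    apply List.ext_getElem?
    intro i'
    rw [(innerAb m k _ m.length).2 i']
    by_cases hi : i' < m.length
    · rw [if_pos hi, List.getElem?_map, List.getElem?_range hi,
        List.getElem?_map, List.getElem?_range hi, Option.map_some, Option.map_eq_map,
        Option.map_some]
      congr 1
      apply List.ext_getElem?
      intro j'
      have hlenmap : ((List.range (m.headD []).length).map
          (fun j => if j < k then va m i' j else 0)).length = (m.headD []).length := by simp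
      rw [List.getElem?_set]
      by_cases hj : j' < (m.headD []).length
      · by_cases hjk : k = j'
        · subst hjk
          rw [if_pos rfl, if_pos (by rw [hlenmap]; exact hkC),
            List.getElem?_map, List.getElem?_range hj, Option.map_some]
          simp
        · rw [if_neg hjk, List.getElem?_map, List.getElem?_range hj,
            List.getElem?_map, List.getElem?_range hj, Option.map_some, Option.map_some]
          have hiff : j' < k ↔ j' < k + 1 := by omega
          simp only [hiff]
      · have hne : k ≠ j' := by omega
        rw [if_neg hne,
          List.getElem?_eq_none (by simp only [List.length_map, List.length_range]; omega),
          List.getElem?_eq_none (by simp only [List.length_map, List.length_range]; omega)]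
    · rw [if_neg hi,
        List.getElem?_eq_none (by simp only [List.length_map, List.length_range]; omega),
        List.getElem?_eq_none (by simp only [List.length_map, List.length_range]; omega)]

-- ===== from-above table, B side =====
theorem aboveB (m : List (List Int))
    (hlen : ∀ r ∈ m, (m.headD []).length ≤ r.length) :
    ∀ (rows : List (List Int)) (k : Nat) (prev : List Int),
      m.drop k = rows →
      (∀ j', prev[j']? = if j' < (m.headD []).length then some (pA m j' k) else none) →
      aboveRows prev rows = (List.range (m.length - k)).map (fun t =>
        (List.range (m.headD []).length).map (fun j => va m (k + t) j)) := by
  intro rows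
  induction rows with
  | nil =>
    intro k prev hd _
    have hle : m.length ≤ k := List.drop_eq_nil_iff.mp hd
    simp [Nat.sub_eq_zero_of_le hle, aboveRows]
  | cons row rest ih =>
    intro k prev hd hprev
    have hk : k < m.length := by
      by_contra h
      rw [List.drop_eq_nil_of_le (by omega)] at hd
      simp at hd
    rw [List.drop_eq_getElem_cons hk] at hd
    obtain ⟨hrow, hrest⟩ := List.cons.inj hd
    have hrowlen : (m.headD []).length ≤ row.length := by
      apply hlen
      rw [← hrow]; exact List.getElem_mem hk
    have hcell : ∀ j', j' < (m.headD []).length → cellM m k j' = row.getD j' 0 := by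
      intro j' _
      simp only [cellM, List.getD_eq_getElem?_getD, List.getElem?_eq_getElem hk, ← hrow]
      rfl
    have hcur : ∀ j', (List.zipWith (fun x p => if x = 0 then 0 else x + p) row prev)[j']? =
        if j' < (m.headD []).length then some (va m k j') else none := by
      intro j'
      rw [List.getElem?_zipWith, hprev j']
      by_cases hj : j' < (m.headD []).length
      · rw [List.getElem?_eq_getElem (by omega : j' < row.length)]
        simp only [hj, if_pos]
        have hx : cellM m k j' = row[j'] := by
          rw [hcell j' hj, List.getD_eq_getElem?_getD, List.getElem?_eq_getElem
            (by omega : j' < row.length)]; rfl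
        cases k with
        | zero =>
          simp only [pA, va, ← hx]
          by_cases h0 : cellM m 0 j' = 0 <;> simp [h0] <;> ring
        | succ n =>
          simp only [pA, va, ← hx]
          by_cases h0 : cellM m (n+1) j' = 0 <;> simp [h0] <;> ring
      · rw [if_neg hj, if_neg hj]
        cases row[j']? <;> rfl
    have hcurlist : List.zipWith (fun x p => if x = 0 then 0 else x + p) row prev =
        (List.range (m.headD []).length).map (fun j => va m k j) := by
      apply List.ext_getElem?
      intro j'
      rw [hcur j']
      by_cases hj : j' < (m.headD []).length
      · rw [if_pos hj, List.getElem?_map, List.getElem?_range hj, Option.map_some]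
      · rw [if_neg hj,
          List.getElem?_eq_none (by simp only [List.length_map, List.length_range]; omega)]
    rw [show aboveRows prev (row :: rest) =
        (List.zipWith (fun x p => if x = 0 then 0 else x + p) row prev) ::
          aboveRows (List.zipWith (fun x p => if x = 0 then 0 else x + p) row prev) rest
      from rfl]
    rw [ih (k+1) _ hrest (by intro j'; rw [hcur j']; rfl)]
    have hsub : m.length - k = (m.length - (k+1)) + 1 := by omega
    rw [hsub, List.range_succ_eq_map, List.map_cons, List.map_map]
    have htail : List.map (fun t => List.map (fun j => va m (k + 1 + t) j)
          (List.range (m.headD []).length)) (List.range (m.length - (k+1))) =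
        List.map ((fun t => List.map (fun j => va m (k + t) j)
          (List.range (m.headD []).length)) ∘ Nat.succ) (List.range (m.length - (k + 1))) := by
      apply List.map_congr_left
      intro t _
      simp only [Function.comp]
      have harith : k + 1 + t = k + (t + 1) := by omega
      rw [harith]
    refine congrArg₂ List.cons ?_ htail
    rw [hcurlist]
    simp

-- ===== from-right table, A side =====
theorem innerRt (m : List (List Int)) (i : Nat) :
    ∀ (js : List Nat) (g : List (List Int)) (p : Int),
    js.foldl (stepRt m i) (g, p) =
      (g.modify i (fun row => (js.foldl (rstep m i) (row, p)).1),
       (js.foldl (rstep m i) (([] : List Int), p)).2) := by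
  intro js
  induction js with
  | nil =>
    intro g p
    simp only [List.foldl_nil]
    have hid : (g.modify i fun row => row) = g := by
      apply List.ext_getElem?
      intro j'
      rw [List.getElem?_modify]
      cases g[j']? <;> simp
    rw [hid]
  | cons j js ih =>
    intro g p
    rw [List.foldl_cons]
    show js.foldl (stepRt m i) (g.modify i _, _) = _
    rw [ih]
    rw [modify_modify]
    rfl

theorem foldl_modify_entries {α : Type} (K : Nat → α → α) :
    ∀ (n : Nat) (g : List α) (i' : Nat),
    ((List.range n).foldl (fun g i => g.modify i (K i)) g)[i']? =
      if i' < n then (K i') <$> g[i']? else g[i']? := by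
  intro n
  induction n with
  | zero => simp
  | succ n ih =>
    intro g i'
    rw [List.range_succ, List.foldl_append, List.foldl_cons, List.foldl_nil,
      List.getElem?_modify, ih]
    rcases Nat.lt_trichotomy i' n with h1 | h1 | h1
    · have hne : n ≠ i' := by omega
      rw [if_pos h1, if_pos (by omega : i' < n + 1)]
      cases hg : g[i']? with
      | none => rfl
      | some r => simp [hne]
    · subst h1
      rw [if_neg (by omega : ¬ i' < i'), if_pos (by omega : i' < i' + 1)]
      cases hg : g[i']? with
      | none => rfl
      | some r => simp
    · rw [if_neg (by omega : ¬ i' < n), if_neg (by omega : ¬ i' < n + 1)]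
      cases hg : g[i']? with
      | none => rfl
      | some r => simp [show n ≠ i' by omega]

-- values written by A's inner right loop, peeled from the last column
def rrW (c : Nat → Int) : Nat → Int → List Int
  | 0, _ => []
  | n+1, p => rrW c n ((if c n = 0 then 0 else p) + c n) ++ [(if c n = 0 then 0 else p) + c n]

def rrS (c : Nat → Int) : Nat → Int → Int
  | 0, p => p
  | n+1, p => rrS c n ((if c n = 0 then 0 else p) + c n)

theorem rowfold (m : List (List Int)) (i : Nat) :
    ∀ (n : Nat) (suffix : List Int) (p : Int),
    (List.range n).reverse.foldl (rstep m i) (List.replicate n (0:Int) ++ suffix, p) =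
      (rrW (fun j => cellM m i j) n p ++ suffix, rrS (fun j => cellM m i j) n p) := by
  intro n
  induction n with
  | zero => intro suffix p; simp [rrW, rrS]
  | succ n ih =>
    intro suffix p
    have hrev : (List.range (n+1)).reverse = n :: (List.range n).reverse := by
      rw [List.range_succ, List.reverse_append]; rfl
    rw [hrev, List.foldl_cons]
    have hstep : rstep m i (List.replicate (n+1) (0:Int) ++ suffix, p) n =
        (List.replicate n (0:Int) ++ (((if cellM m i n = 0 then 0 else p) + cellM m i n) :: suffix),
         (if cellM m i n = 0 then 0 else p) + cellM m i n) := by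
      simp only [rstep, cellM]
      rw [List.replicate_succ', List.append_assoc, List.set_append]
      simp
    rw [hstep, ih]
    simp [rrW, rrS, List.append_assoc]

-- rowRight with the value beyond the right end made explicit
def rrP : List Int → Int → List Int × Int
  | [], p => ([], p)
  | x :: t, p =>
    ((((if x = 0 then 0 else (rrP t p).2) + x)) :: (rrP t p).1,
     ((if x = 0 then 0 else (rrP t p).2) + x))

theorem rrP_snd (l : List Int) (p : Int) : (rrP l p).2 = (rrP l p).1.headD p := by
  cases l <;> simp [rrP]

theorem headD_append_singleton {α : Type} (L : List α) (v p : α) :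
    (L ++ [v]).headD p = L.headD v := by
  cases L <;> simp

theorem rrP_append (l : List Int) (x : Int) (p : Int) :
    (rrP (l ++ [x]) p).1 =
      (rrP l ((if x = 0 then 0 else p) + x)).1 ++ [(if x = 0 then 0 else p) + x] := by
  induction l with
  | nil => simp [rrP]
  | cons y l ihl =>
    show ((if y = 0 then 0 else (rrP (l ++ [x]) p).2) + y) :: (rrP (l ++ [x]) p).1 = _
    rw [rrP_snd, ihl]
    show _ = (((if y = 0 then 0 else (rrP l _).2) + y) :: (rrP l _).1) ++ [_]
    rw [rrP_snd]
    rw [headD_append_singleton]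
    rfl

theorem rrW_eq_rrP (c : Nat → Int) :
    ∀ (n : Nat) (p : Int), rrW c n p = (rrP ((List.range n).map c) p).1 := by
  intro n
  induction n with
  | zero => intro p; simp [rrW, rrP]
  | succ n ih =>
    intro p
    rw [List.range_succ, List.map_append, List.map_cons, List.map_nil, rrP_append, ← ih]
    rfl

theorem rowRight_rrP (r : List Int) : rowRight r = (rrP r 0).1 := by
  induction r with
  | nil => rfl
  | cons x t ih =>
    show (if x = 0 then 0 else x + (rowRight t).headD 0) :: rowRight t = _
    rw [ih]
    show _ = ((if x = 0 then 0 else (rrP t 0).2) + x) :: (rrP t 0).1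
    rw [rrP_snd]
    by_cases h : x = 0 <;> simp [h] <;> ring

-- ===== assembly =====
theorem above_eq (m : List (List Int))
    (hlen : ∀ r ∈ m, (m.headD []).length ≤ r.length) :
    (List.range (m.headD []).length).foldl
        (fun g j => ((List.range m.length).foldl (stepAb m j) (g, 0)).1)
        (List.replicate m.length (List.replicate (m.headD []).length 0)) =
      aboveRows (List.replicate (m.headD []).length 0) m := by
  rw [aboveA_aux m (m.headD []).length (le_refl _)]
  rw [aboveB m hlen m 0 (List.replicate (m.headD []).length 0) (by simp)
      (by
        intro j'
        rw [List.getElem?_replicate]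
        by_cases h : j' < (m.headD []).length
        · rw [if_pos h, if_pos h]; rfl
        · rw [if_neg h, if_neg h])]
  simp only [Nat.sub_zero, Nat.zero_add]
  apply List.map_congr_left
  intro i _
  apply List.map_congr_left
  intro j hj
  rw [if_pos (List.mem_range.mp hj)]

theorem right_eq (m : List (List Int))
    (hlen : ∀ r ∈ m, (m.headD []).length ≤ r.length) :
    (List.range m.length).foldl
        (fun g i => ((List.range (m.headD []).length).reverse.foldl (stepRt m i) (g, 0)).1)
        (List.replicate m.length (List.replicate (m.headD []).length 0)) =
      m.map (fun row => rowRight (row.take (m.headD []).length)) := by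
  have hfun : (fun (g : List (List Int)) i =>
      ((List.range (m.headD []).length).reverse.foldl (stepRt m i) (g, 0)).1) =
      fun g i => g.modify i
        (fun row => ((List.range (m.headD []).length).reverse.foldl (rstep m i) (row, 0)).1) := by
    funext g i
    rw [innerRt m i]
  rw [hfun]
  apply List.ext_getElem?
  intro i'
  rw [foldl_modify_entries]
  by_cases hi : i' < m.length
  · rw [if_pos hi, List.getElem?_replicate, if_pos hi, List.getElem?_map,
      List.getElem?_eq_getElem hi, Option.map_eq_map, Option.map_some, Option.map_some]
    congr 1
    show (List.foldl (rstep m i')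
        (List.replicate (m.headD []).length (0:Int), 0)
        (List.range (m.headD []).length).reverse).1 = rowRight (m[i'].take (m.headD []).length)
    rw [show List.replicate (m.headD []).length (0:Int) =
        List.replicate (m.headD []).length (0:Int) ++ [] from (List.append_nil _).symm]
    rw [rowfold m i' (m.headD []).length [] 0]
    show rrW (fun j => cellM m i' j) (m.headD []).length 0 ++ [] = _
    rw [List.append_nil, rrW_eq_rrP]
    have hrow : m.getD i' [] = m[i'] := by
      rw [List.getD_eq_getElem?_getD, List.getElem?_eq_getElem hi]; rfl
    have hcell : (List.range (m.headD []).length).map (fun j => cellM m i' j) =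
        m[i'].take (m.headD []).length := by
      simp only [cellM, hrow]
      exact map_range_getD_take m[i'] (m.headD []).length (hlen m[i'] (List.getElem_mem hi))
    rw [hcell, ← rowRight_rrP]
  · rw [if_neg hi,
      List.getElem?_eq_none (by simp only [List.length_replicate]; omega),
      List.getElem?_eq_none (by simp only [List.length_map]; omega)]

-- ===== VERDICT (by name: the statement is the Claim_ definition above) =====
theorem prefixSum2D_spec : Claim_equal_prefixSum2D := by
  intro m _dom hpre
  obtain ⟨_, hlen⟩ := hpre
  show prefixSum2D m = prefixSum2D_alt m
  rw [portA_eq]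
  show _ = (aboveRows (List.replicate (m.headD []).length 0) m,
    m.map (fun row => rowRight (row.take (m.headD []).length)))
  exact Prod.ext (above_eq m hlen) (right_eq m hlen)
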